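-- pv_equiv track=rewrite | github.com/KLessing/1-12 | src/validator.py | _get_valid_combination
-- ===== SOURCE A (Python) =====
-- def _get_valid_combination(values):
--     combinations = set()
--
--     # get all combinations which are equal for all values
--     for i, value in enumerate(values):
--         # save the current single value
--         current_combinations = {value}
--         # check all combinations
--         for j, check_value in enumerate(values):
--             # except the current value
--             if j != i:
--                 current_combination = value + check_value
--                 if current_combination >= 7:
--                     current_combinations.add(current_combination)
--         if i == 0:
--             # save combinations for first number
--             combinations = current_combinations
--         else:
--             # only save the combinations which are equal for all numbers
--             combinations = combinations.intersection(current_combinations)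
--
--     return combinations
-- ===== SOURCE B (Python) =====
-- def _get_valid_combination(values):
--     n = len(values)
--     counts = {}
--     for i, value in enumerate(values):
--         current = {value} | {value + w for j, w in enumerate(values)
--                              if j != i and value + w >= 7}
--         for x in current:
--             counts[x] = counts.get(x, 0) + 1
--     return {x for x, c in counts.items() if c == n}
-- ===== Notes on version B (the rewrite author's own statement) =====
-- stated objective: alternative
-- what changed: Replaces the running set-intersection accumulator with a frequency counter: each position's candidate set is built as a comprehension, every element bumps a counter, and the result is the elements whose count equals len(values).
import Mathlib
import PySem

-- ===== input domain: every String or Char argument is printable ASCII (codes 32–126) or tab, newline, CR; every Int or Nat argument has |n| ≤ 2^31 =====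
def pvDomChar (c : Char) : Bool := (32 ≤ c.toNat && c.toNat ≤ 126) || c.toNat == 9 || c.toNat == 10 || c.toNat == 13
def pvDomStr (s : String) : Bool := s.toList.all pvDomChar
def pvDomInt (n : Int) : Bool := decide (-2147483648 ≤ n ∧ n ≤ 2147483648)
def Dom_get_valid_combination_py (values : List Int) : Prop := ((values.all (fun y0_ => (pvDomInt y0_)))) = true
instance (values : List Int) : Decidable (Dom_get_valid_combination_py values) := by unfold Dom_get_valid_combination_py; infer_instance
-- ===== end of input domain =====

-- B replaces A's running set-intersection with a per-element frequency counter filtered by count == len(values); alternative decomposition, same asymptotic cost.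

-- ===== PORT A =====
def get_valid_combination_py (values : List Int) : List Int :=
  (PySem.List.enumerate values).foldl
    (fun combinations p =>
      let i := p.1
      let value := p.2
      let current_combinations :=
        (PySem.List.enumerate values).foldl
          (fun cur q =>
            if q.1 ≠ i then
              (if value + q.2 ≥ 7 then PySem.Set.add cur (value + q.2) else cur)
            else cur)
          (PySem.Set.ofList [value])
      if i == 0 then current_combinations
      else PySem.Set.inter combinations current_combinations)
    PySem.Set.empty

-- ===== PORT B =====
def get_valid_combination_py_alt (values : List Int) : List Int :=
  let n : Int := values.length
  let counts : PySem.Dict Int Int :=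
    (PySem.List.enumerate values).foldl
      (fun d p =>
        let value := p.2
        let current : PySem.Set Int :=
          PySem.Set.union (PySem.Set.ofList [value])
            (((PySem.List.enumerate values).filter
                (fun q => decide (q.1 ≠ p.1 ∧ value + q.2 ≥ 7))).map
              (fun q => value + q.2))
        current.foldl (fun d x => d.modify x 0 (· + 1)) d)
      PySem.Dict.empty
  PySem.Set.ofList ((counts.items.filter (fun q => q.2 == n)).map (·.1))

-- ===== PRECONDITION & SPEC =====
def Spec_get_valid_combination_py (values : List Int) (out : List Int) : Prop := out = get_valid_combination_py_alt values
instance (values : List Int) (out : List Int) : Decidable (Spec_get_valid_combination_py values out) := by unfold Spec_get_valid_combination_py; infer_instance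

-- ===== CLAIM (what is proved, stated in full; the proofs are below) =====
def Claim_equal_get_valid_combination_py : Prop := ∀ (values : List Int), Dom_get_valid_combination_py values → Spec_get_valid_combination_py values (get_valid_combination_py values)

-- ===== LEMMAS AND PROOFS =====

-- The candidate set of position (i, value): {value} plus all qualifying pairwise sums, in scan order.
def Sset (values : List Int) (i value : Int) : List Int :=
  PySem.Set.update (PySem.Set.ofList [value])
    (((PySem.List.enumerate values).filter
        (fun q => decide (q.1 ≠ i ∧ value + q.2 ≥ 7))).map (fun q => value + q.2))

lemma Sset_nodup (values : List Int) (i value : Int) : (Sset values i value).Nodup := by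
  unfold Sset
  exact PySem.Set.nodup_update _ _ (by simp [PySem.Set.ofList, PySem.Set.add, PySem.Set.empty])

-- A's inner loop builds exactly Sset.
lemma buildA (values : List Int) (i value : Int) :
    (PySem.List.enumerate values).foldl
      (fun cur q =>
        if q.1 ≠ i then
          (if value + q.2 ≥ 7 then PySem.Set.add cur (value + q.2) else cur)
        else cur)
      (PySem.Set.ofList [value]) = Sset values i value := by
  unfold Sset
  calc (PySem.List.enumerate values).foldl
        (fun cur q =>
          if q.1 ≠ i then
            (if value + q.2 ≥ 7 then PySem.Set.add cur (value + q.2) else cur)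
          else cur)
        (PySem.Set.ofList [value])
      = (PySem.List.enumerate values).foldl
        (fun cur q => if (q.1 ≠ i ∧ value + q.2 ≥ 7) then PySem.Set.add cur (value + q.2) else cur)
        (PySem.Set.ofList [value]) := by
        apply PySem.List.foldl_congr_mem
        intro acc q _
        by_cases h1 : q.1 = i <;> by_cases h2 : value + q.2 ≥ 7 <;> simp [h1, h2]
    _ = ((PySem.List.enumerate values).filter
          (fun q => decide (q.1 ≠ i ∧ value + q.2 ≥ 7))).foldl
          (fun cur q => PySem.Set.add cur (value + q.2)) (PySem.Set.ofList [value]) :=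
        PySem.List.foldl_ite_eq_foldl_filter _ _ _ _
    _ = _ := by rw [PySem.Set.update, List.foldl_map]

-- A's outer loop after the first position is a running intersection = a filter of the accumulator.
lemma interFold (B : Int × Int → List Int) (vs : List Int) (s : Int) (hs : 1 ≤ s) (acc : List Int) :
    (PySem.List.enumerate vs s).foldl
      (fun acc q => if q.1 == 0 then B q else PySem.Set.inter acc (B q)) acc
    = acc.filter (fun x => decide (∀ q ∈ PySem.List.enumerate vs s, x ∈ B q)) := by
  induction vs generalizing s acc with
  | nil => simp [PySem.List.enumerate_nil]
  | cons v vs ih =>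
    rw [PySem.List.enumerate_cons, List.foldl_cons]
    rw [if_neg (show ¬(((s, v).1 == (0 : Int)) = true) from by simp; omega)]
    rw [ih (s + 1) (by omega)]
    unfold PySem.Set.inter
    rw [List.filter_filter]
    apply List.filter_congr
    intro x _
    rw [Bool.eq_iff_iff]
    simp only [List.mem_cons, decide_eq_true_eq, Bool.and_eq_true, PySem.Set.contains_iff]
    constructor
    · rintro ⟨h1, h2⟩ q hq
      rcases hq with h | h
      · subst h; exact h2
      · exact h1 q h
    · intro h
      exact ⟨fun q hq => h q (Or.inr hq), h (s, v) (Or.inl rfl)⟩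

-- characterisation of A on a non-empty list
lemma A_char (v0 : Int) (vs : List Int) :
    get_valid_combination_py (v0 :: vs)
    = (Sset (v0 :: vs) 0 v0).filter
        (fun x => decide (∀ q ∈ PySem.List.enumerate vs 1, x ∈ Sset (v0 :: vs) q.1 q.2)) := by
  unfold get_valid_combination_py
  have hstep : (PySem.List.enumerate (v0 :: vs)).foldl
      (fun combinations p =>
        if p.1 == 0 then
          (PySem.List.enumerate (v0 :: vs)).foldl
            (fun cur q =>
              if q.1 ≠ p.1 then
                (if p.2 + q.2 ≥ 7 then PySem.Set.add cur (p.2 + q.2) else cur)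
              else cur)
            (PySem.Set.ofList [p.2])
        else PySem.Set.inter combinations
          ((PySem.List.enumerate (v0 :: vs)).foldl
            (fun cur q =>
              if q.1 ≠ p.1 then
                (if p.2 + q.2 ≥ 7 then PySem.Set.add cur (p.2 + q.2) else cur)
              else cur)
            (PySem.Set.ofList [p.2])))
      PySem.Set.empty
    = (PySem.List.enumerate (v0 :: vs)).foldl
      (fun combinations p =>
        if p.1 == 0 then Sset (v0 :: vs) p.1 p.2
        else PySem.Set.inter combinations (Sset (v0 :: vs) p.1 p.2))
      PySem.Set.empty := by
    apply PySem.List.foldl_congr_mem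
    intro acc p _
    rw [buildA]
  rw [hstep, PySem.List.enumerate_cons, List.foldl_cons]
  rw [show ((((0 : Int), v0)).1 == (0 : Int)) = true from by simp]
  simp only [if_pos]
  exact interFold _ vs 1 (by norm_num) _

-- count in a concatenation of Nodup blocks is at most the block count …
lemma count_flat_le (B : Int × Int → List Int) (l : List (Int × Int)) (x : Int)
    (hB : ∀ q ∈ l, (B q).Nodup) :
    (l.flatMap B).count x ≤ l.length := by
  induction l with
  | nil => simp
  | cons q l ih =>
    simp only [List.flatMap_cons, List.count_append, List.length_cons]
    have h1 : (B q).count x ≤ 1 := (List.nodup_iff_count_le_one.mp (hB q (List.mem_cons_self)) x)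
    have h2 := ih (fun r hr => hB r (List.mem_cons_of_mem _ hr))
    omega

-- … and equals it iff the element is in every block
lemma count_flat_eq_length_iff (B : Int × Int → List Int) (l : List (Int × Int)) (x : Int)
    (hB : ∀ q ∈ l, (B q).Nodup) :
    ((l.flatMap B).count x = l.length) ↔ (∀ q ∈ l, x ∈ B q) := by
  induction l with
  | nil => simp
  | cons q l ih =>
    simp only [List.flatMap_cons, List.count_append, List.length_cons, List.forall_mem_cons]
    have h1 : (B q).count x ≤ 1 := (List.nodup_iff_count_le_one.mp (hB q (List.mem_cons_self)) x)
    have h2 : (l.flatMap B).count x ≤ l.length :=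
      count_flat_le B l x (fun r hr => hB r (List.mem_cons_of_mem _ hr))
    have hmem : (0 < (B q).count x) ↔ x ∈ B q := List.count_pos_iff
    rw [← ih (fun r hr => hB r (List.mem_cons_of_mem _ hr))]
    constructor
    · intro h
      exact ⟨hmem.mp (by omega), by omega⟩
    · rintro ⟨hx, hc⟩
      have := hmem.mpr hx
      omega

-- filtering an updated set adds nothing when the predicate forces membership in the base set
lemma filter_update (p : Int → Bool) (l : List Int) (s : List Int)
    (h : ∀ x, p x = true → x ∈ s) :
    (PySem.Set.update s l).filter p = s.filter p := by
  induction l generalizing s with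
  | nil => rfl
  | cons y l ih =>
    show (PySem.Set.update (PySem.Set.add s y) l).filter p = s.filter p
    rw [ih (PySem.Set.add s y) (fun x hx => (PySem.Set.mem_add s y x).mpr (Or.inl (h x hx)))]
    unfold PySem.Set.add
    by_cases hm : y ∈ s
    · rw [if_pos (by simpa using hm)]
    · rw [if_neg (by simpa using hm), List.filter_append]
      have hp : p y = false := by
        by_contra hpc
        exact hm (h y (by simpa using hpc))
      simp [hp]

-- characterisation of B
lemma B_char (values : List Int) :
    get_valid_combination_py_alt values
    = PySem.Set.ofList
        ((PySem.Set.ofList ((PySem.List.enumerate values).flatMap (fun q => Sset values q.1 q.2))).filter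
          (fun x => decide (∀ q ∈ PySem.List.enumerate values, x ∈ Sset values q.1 q.2))) := by
  unfold get_valid_combination_py_alt
  simp only []
  have hL : (PySem.List.enumerate values).foldl
      (fun d p =>
        (PySem.Set.union (PySem.Set.ofList [p.2])
          (((PySem.List.enumerate values).filter
              (fun q => decide (q.1 ≠ p.1 ∧ p.2 + q.2 ≥ 7))).map (fun q => p.2 + q.2))).foldl
          (fun d x => PySem.Dict.modify d x 0 (· + 1)) d)
      PySem.Dict.empty
    = PySem.Dict.counter ((PySem.List.enumerate values).flatMap (fun q => Sset values q.1 q.2)) := by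
    rw [PySem.Dict.counter_eq_foldl, List.foldl_flatMap]
    rfl
  rw [hL, PySem.Dict.items_counter, List.filter_map, List.map_map]
  have hmap : ((fun (q : Int × Int) => q.1) ∘
      (fun k => (k, (((PySem.List.enumerate values).flatMap (fun q => Sset values q.1 q.2)).count k : Int))))
      = fun k => k := rfl
  rw [hmap, List.map_id']
  congr 1
  apply List.filter_congr
  intro x _
  rw [Bool.eq_iff_iff]
  simp only [Function.comp, beq_iff_eq, decide_eq_true_eq, Int.natCast_inj]
  have := count_flat_eq_length_iff (fun q => Sset values q.1 q.2) (PySem.List.enumerate values) x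
    (fun q _ => Sset_nodup values q.1 q.2)
  rw [PySem.List.length_enumerate] at this
  exact this

-- ===== VERDICT (by name: the statement is the Claim_ definition above) =====
theorem get_valid_combination_py_spec : Claim_equal_get_valid_combination_py := by
  intro values _
  unfold Spec_get_valid_combination_py
  cases values with
  | nil => rfl
  | cons v0 vs =>
    rw [A_char, B_char, PySem.List.enumerate_cons, List.flatMap_cons]
    have hS0 : PySem.Set.ofList (Sset (v0 :: vs) ((0 : Int), v0).1 ((0 : Int), v0).2)
        = Sset (v0 :: vs) 0 v0 :=
      PySem.Set.ofList_eq_self_of_nodup _ (Sset_nodup _ _ _)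
    rw [PySem.Set.ofList_append, hS0]
    rw [filter_update _ _ _ (by
      intro x hx
      simp only [decide_eq_true_eq] at hx
      exact hx ((0 : Int), v0) List.mem_cons_self)]
    rw [PySem.Set.ofList_eq_self_of_nodup _ ((Sset_nodup (v0 :: vs) 0 v0).filter _)]
    symm
    apply List.filter_congr
    intro x hx
    rw [Bool.eq_iff_iff]
    simp only [decide_eq_true_eq, List.forall_mem_cons]
    exact ⟨fun h => h.2, fun h => ⟨hx, h⟩⟩
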